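-- pv_equiv track=rewrite | github.com/benjaminmetzler/OpenRemoteHub | scripts/main.py | get_devices
-- ===== SOURCE A (Python) =====
-- def get_devices(json_string):
--     device_list = []
--     for command in json_string:
--         if "type" in json_string[command]:
--             if json_string[command]["type"] == "macro":
--                 device_list.extend(get_devices(json_string[command]))
--             elif (
--                 json_string[command]["type"] == "ir"
--                 or json_string[command]["type"] == "bluetooth"
--                 or json_string[command]["type"] == "adb"
--                 or json_string[command]["type"] == "sleep"
--                 or json_string[command]["type"] == "curl"
--             ):
--                 device_list.append(json_string[command]["device"])
--     return device_list
-- ===== SOURCE B (Python) =====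
-- def get_devices(json_string):
--     valid = {"ir", "bluetooth", "adb", "sleep", "curl"}
--     return [v["device"] for v in json_string.values() if v.get("type") in valid]
-- ===== Notes on version B (the rewrite author's own statement) =====
-- stated objective: simpler
-- what changed: Replaced the recursive accumulator loop with a single filter-map comprehension over the dict values using v.get('type') and set membership; the macro recursion, which at this value type can only yield an empty result or raise TypeError, is dropped.
import Mathlib
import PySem

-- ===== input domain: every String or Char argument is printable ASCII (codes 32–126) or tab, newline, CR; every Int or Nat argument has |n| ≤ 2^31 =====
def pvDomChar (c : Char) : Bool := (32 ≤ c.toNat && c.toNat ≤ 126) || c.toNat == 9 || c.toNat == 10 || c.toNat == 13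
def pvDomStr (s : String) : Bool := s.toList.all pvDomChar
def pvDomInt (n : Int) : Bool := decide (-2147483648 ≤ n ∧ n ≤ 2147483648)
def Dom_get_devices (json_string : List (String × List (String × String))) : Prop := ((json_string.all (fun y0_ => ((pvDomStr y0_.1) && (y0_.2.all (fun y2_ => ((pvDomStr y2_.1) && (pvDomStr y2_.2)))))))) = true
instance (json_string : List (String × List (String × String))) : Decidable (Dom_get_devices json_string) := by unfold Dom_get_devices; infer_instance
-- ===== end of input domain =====

-- B replaces A's recursive accumulator loop by one filter-map pass over the values; equivalence is claimed on Pre_, the inputs where A returns (no TypeError/KeyError).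

-- ===== PORT A =====
-- dict lookup d.get(k) / 'k in d' on an assoc-list value (PySem.Dict over the list)
def dget (v : List (String × String)) (k : String) : Option String := (PySem.Dict.mk v).get? k

-- port of the recursive call get_devices(v) where v is a str->str dict: '"type" in s'
-- is a SUBSTRING test there; where it holds Python raises TypeError (such inputs are
-- excluded by Pre_; the marker string below is never produced inside Pre_), else the
-- entry is skipped, so inside Pre_ this returns [].
def get_devices_inner (v : List (String × String)) : List String :=
  v.foldl (fun acc q =>
    if PySem.Str.isIn "type" q.2 then acc ++ ["⟨TypeError⟩"] else acc) []

def get_devices (json_string : List (String × List (String × String))) : List String :=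
  json_string.foldl (fun acc p =>
    match dget p.2 "type" with
    | none => acc                                   -- "type" not in json_string[command]
    | some t =>
      if t = "macro" then acc ++ get_devices_inner p.2
      else if t = "ir" || t = "bluetooth" || t = "adb" || t = "sleep" || t = "curl" then
        -- v["device"]: none = KeyError, excluded by Pre_ (default never used inside Pre_)
        acc ++ [(dget p.2 "device").getD "⟨KeyError⟩"]
      else acc) []

-- ===== PORT B =====
def pvValidTypes : List String := ["ir", "bluetooth", "adb", "sleep", "curl"]

def get_devices_alt (json_string : List (String × List (String × String))) : List String :=
  ((json_string.filter (fun p =>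
      ((dget p.2 "type").map (fun t => pvValidTypes.contains t)).getD false)).map
    (fun p => (dget p.2 "device").getD "⟨KeyError⟩"))

-- ===== PRECONDITION & SPEC =====
-- Pre_ excludes exactly the inputs on which A raises: a macro entry with a string value
-- containing "type" as a substring (TypeError in the recursive call), or a device-typed
-- entry without a "device" key (KeyError).
def Pre_get_devices (json_string : List (String × List (String × String))) : Prop :=
  (json_string.all (fun p =>
    match dget p.2 "type" with
    | none => true
    | some t =>
      if t = "macro" then p.2.all (fun q => !(PySem.Str.isIn "type" q.2))
      else if t = "ir" || t = "bluetooth" || t = "adb" || t = "sleep" || t = "curl" then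
        (dget p.2 "device").isSome
      else true)) = true
instance (json_string : List (String × List (String × String))) : Decidable (Pre_get_devices json_string) := by unfold Pre_get_devices; infer_instance

def pvWitness_get_devices : (List (String × List (String × String))) :=
  [("tv_on", [("type", "ir"), ("device", "tv")]),
   ("all_on", [("type", "macro"), ("1", "tv_on")]),
   ("note", [("comment", "no kind here")])]

def Spec_get_devices (json_string : List (String × List (String × String))) (out : List String) : Prop := out = get_devices_alt json_string
instance (json_string : List (String × List (String × String))) (out : List String) : Decidable (Spec_get_devices json_string out) := by unfold Spec_get_devices; infer_instance

-- ===== CLAIM (what is proved, stated in full; the proofs are below) =====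
def Claim_equal_get_devices : Prop := ∀ (json_string : List (String × List (String × String))), Dom_get_devices json_string → Pre_get_devices json_string → Spec_get_devices json_string (get_devices json_string)

-- ===== LEMMAS AND PROOFS =====

-- inside Pre_, the recursive macro scan collects nothing
lemma inner_nil (v : List (String × String))
    (h : v.all (fun q => !(PySem.Str.isIn "type" q.2)) = true) :
    get_devices_inner v = [] := by
  unfold get_devices_inner
  induction v with
  | nil => rfl
  | cons q v ih =>
    simp only [List.all_cons, Bool.and_eq_true, Bool.not_eq_true'] at h
    simp only [List.foldl_cons, h.1, Bool.false_eq_true, if_false]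
    exact ih h.2

lemma foldl_acc (json_string : List (String × List (String × String)))
    (acc : List String)
    (hpre : Pre_get_devices json_string) :
    json_string.foldl (fun acc p =>
      match dget p.2 "type" with
      | none => acc
      | some t =>
        if t = "macro" then acc ++ get_devices_inner p.2
        else if t = "ir" || t = "bluetooth" || t = "adb" || t = "sleep" || t = "curl" then
          acc ++ [(dget p.2 "device").getD "⟨KeyError⟩"]
        else acc) acc
    = acc ++ get_devices_alt json_string := by
  induction json_string generalizing acc with
  | nil => simp [get_devices_alt]
  | cons p js ih =>
    unfold Pre_get_devices at hpre
    simp only [List.all_cons, Bool.and_eq_true] at hpre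
    have hp := hpre.1
    have hrest : Pre_get_devices js := hpre.2
    cases hty : dget p.2 "type" with
    | none =>
      simp only [List.foldl_cons, hty]
      rw [ih _ hrest]
      simp [get_devices_alt, hty]
    | some t =>
      simp only [hty] at hp
      by_cases hm : t = "macro"
      · subst hm
        have hinner : get_devices_inner p.2 = [] := inner_nil p.2 (by simpa using hp)
        have hnm : "macro" ∉ pvValidTypes := by decide
        simp only [List.foldl_cons, hty, reduceIte, hinner, List.append_nil]
        rw [ih _ hrest]
        simp [get_devices_alt, hty, hnm]
      · by_cases hv : t = "ir" ∨ t = "bluetooth" ∨ t = "adb" ∨ t = "sleep" ∨ t = "curl"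
        · have hvb : (t = "ir" || t = "bluetooth" || t = "adb" || t = "sleep" || t = "curl") = true := by
            simp only [Bool.or_eq_true, decide_eq_true_eq]
            tauto
          have hmem : t ∈ pvValidTypes := by
            simp only [pvValidTypes, List.mem_cons, List.not_mem_nil, or_false]
            tauto
          simp only [List.foldl_cons, hty, if_neg hm, hvb, reduceIte]
          rw [ih _ hrest]
          simp [get_devices_alt, hty, hmem]
        · have hvb : (t = "ir" || t = "bluetooth" || t = "adb" || t = "sleep" || t = "curl") = false := by
            simp only [Bool.or_eq_false_iff, decide_eq_false_iff_not]
            tauto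
          have hmem : t ∉ pvValidTypes := by
            simp only [pvValidTypes, List.mem_cons, List.not_mem_nil, or_false]
            tauto
          simp only [List.foldl_cons, hty, if_neg hm, hvb, Bool.false_eq_true, if_false]
          rw [ih _ hrest]
          simp [get_devices_alt, hty, hmem]

-- ===== VERDICT (by name: the statement is the Claim_ definition above) =====
theorem get_devices_spec : Claim_equal_get_devices := by
  intro js _ hpre
  unfold Spec_get_devices get_devices
  simpa using foldl_acc js [] hpre
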